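-- pv_equiv track=rewrite | github.com/havokzero/Test1 | main7.py | shadow_block
-- ===== SOURCE A (Python) =====
-- from typing import List, Tuple, Optional
--
-- def shadow_block(block: List[str], dx:int=1, dy:int=1, char:str="▒") -> List[str]:
--     h, w = len(block), max((len(l) for l in block), default=0)
--     canvas = [list(" "*(w+dx)) for _ in range(h+dy)]
--     for y, line in enumerate(block):
--         for x, ch in enumerate(line):
--             if ch != " ":
--                 sy, sx = y+dy, x+dx
--                 if 0 <= sy < len(canvas) and 0 <= sx < len(canvas[0]):
--                     canvas[sy][sx] = char
--     return ["".join(r) for r in canvas]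
-- ===== SOURCE B (Python) =====
-- def shadow_block(block, dx=1, dy=1, char="\u2592"):
--     h = len(block)
--     w = max((len(l) for l in block), default=0)
--     def cell(sy, sx):
--         y, x = sy - dy, sx - dx
--         if 0 <= y < h and 0 <= x < len(block[y]) and block[y][x] != " ":
--             return char
--         return " "
--     return ["".join(cell(sy, sx) for sx in range(w + dx)) for sy in range(h + dy)]
-- ===== Notes on version B (the rewrite author's own statement) =====
-- stated objective: simpler
-- what changed: A allocates a mutable 2D character grid and writes a shadow cell for every non-space source character (input-driven); B builds each output row directly, computing every output cell from its source position with no grid and no mutation (output-driven).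
import Mathlib
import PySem

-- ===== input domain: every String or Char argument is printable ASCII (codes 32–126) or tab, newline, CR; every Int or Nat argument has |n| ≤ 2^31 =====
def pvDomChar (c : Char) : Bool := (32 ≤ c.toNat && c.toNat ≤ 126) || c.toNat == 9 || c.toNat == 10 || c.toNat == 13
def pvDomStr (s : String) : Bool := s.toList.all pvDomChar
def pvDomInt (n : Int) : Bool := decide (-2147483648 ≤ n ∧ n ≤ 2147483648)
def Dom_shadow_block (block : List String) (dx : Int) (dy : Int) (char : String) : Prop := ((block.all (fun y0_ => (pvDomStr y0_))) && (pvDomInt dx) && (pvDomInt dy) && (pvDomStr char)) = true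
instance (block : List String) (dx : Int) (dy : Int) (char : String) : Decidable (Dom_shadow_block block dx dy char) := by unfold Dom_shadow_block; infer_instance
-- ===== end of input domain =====

-- B replaces A's mutable 2D canvas (iterate source chars, write shadow cells) by a direct
-- output-driven construction: each output cell is computed from its source position (objective: simpler; same cost).

-- ===== PORT A =====
-- canvas[sy][sx] = char, guarded exactly as Python's 'if 0 <= sy < len(canvas) and 0 <= sx < len(canvas[0])'
def pvUpd (char : String) (cv : List (List String)) (sy sx : Int) : List (List String) :=
  if 0 ≤ sy ∧ sy < (cv.length : Int) ∧ 0 ≤ sx ∧ sx < ((cv.headD []).length : Int) then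
    cv.set sy.toNat ((cv.getD sy.toNat []).set sx.toNat char)
  else cv

-- the inner loop 'for x, ch in enumerate(line): …'
def pvLine (dx dy : Int) (char : String) (y : Int) (cv : List (List String)) (line : List Char) : List (List String) :=
  (PySem.List.enumerate line 0).foldl
    (fun c q => if q.2 ≠ ' ' then pvUpd char c (y + dy) (q.1 + dx) else c) cv

def shadow_block (block : List String) (dx : Int) (dy : Int) (char : String) : List String :=
  let h : Int := block.length
  let w : Int := (block.map (fun l => ((l.toList.length : Int)))).foldl max 0
  let canvas : List (List String) := List.replicate (h + dy).toNat (List.replicate (w + dx).toNat " ")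
  let final := (PySem.List.enumerate block 0).foldl
    (fun cv p => pvLine dx dy char p.1 cv p.2.toList) canvas
  final.map String.join

-- ===== PORT B =====
-- 'cell(sy, sx)' of Source B; block[y] read only under the 0 ≤ y < h guard, so the default of pyGetD is never used
def pvCell (block : List String) (dx dy : Int) (char : String) (h : Int) (sy sx : Int) : String :=
  let y := sy - dy
  let x := sx - dx
  if 0 ≤ y ∧ y < h then
    let line := (PySem.List.pyGetD block y "").toList
    if 0 ≤ x ∧ x < (line.length : Int) ∧ line.getD x.toNat ' ' ≠ ' ' then char else " "
  else " "

def shadow_block_alt (block : List String) (dx : Int) (dy : Int) (char : String) : List String :=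
  let h : Int := block.length
  let w : Int := (block.map (fun l => ((l.toList.length : Int)))).foldl max 0
  (PySem.List.pyRange 0 (h + dy) 1).map (fun sy =>
    String.join ((PySem.List.pyRange 0 (w + dx) 1).map (fun sx => pvCell block dx dy char h sy sx)))

-- ===== PRECONDITION & SPEC =====
def Spec_shadow_block (block : List String) (dx : Int) (dy : Int) (char : String) (out : List String) : Prop := out = shadow_block_alt block dx dy char
instance (block : List String) (dx : Int) (dy : Int) (char : String) (out : List String) : Decidable (Spec_shadow_block block dx dy char out) := by unfold Spec_shadow_block; infer_instance

-- ===== CLAIM (what is proved, stated in full; the proofs are below) =====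
def Claim_equal_shadow_block : Prop := ∀ (block : List String) (dx : Int) (dy : Int) (char : String), Dom_shadow_block block dx dy char → Spec_shadow_block block dx dy char (shadow_block block dx dy char)

-- ===== LEMMAS AND PROOFS =====

-- canvas shape: H rows, each of width W
def pvShape (cv : List (List String)) (H W : Nat) : Prop :=
  cv.length = H ∧ ∀ r ∈ cv, r.length = W

-- read one cell of the canvas
def pvGetCell (cv : List (List String)) (ty tx : Nat) : String :=
  (cv.getD ty []).getD tx " "

theorem pv_getD_mem {α : Type} (l : List α) (n : Nat) (d : α) (h : n < l.length) : l.getD n d ∈ l := by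
  rw [List.getD_eq_getElem?_getD, List.getElem?_eq_getElem h]
  exact List.getElem_mem h

theorem pv_getD_set_self {α : Type} (l : List α) (n : Nat) (a d : α) (h : n < l.length) :
    (l.set n a).getD n d = a := by
  simp [List.getD_eq_getElem?_getD, h]

theorem pv_getD_set_ne {α : Type} (l : List α) (n m : Nat) (a d : α) (h : n ≠ m) :
    (l.set n a).getD m d = l.getD m d := by
  simp [List.getD_eq_getElem?_getD, List.getElem?_set_ne h]

theorem pvUpd_shape {char : String} {cv : List (List String)} {H W : Nat} {sy sx : Int}
    (hs : pvShape cv H W) : pvShape (pvUpd char cv sy sx) H W := by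
  obtain ⟨hl, hr⟩ := hs
  unfold pvUpd
  split
  · refine ⟨by simpa using hl, ?_⟩
    intro r hrm
    rcases List.mem_or_eq_of_mem_set hrm with h | h
    · exact hr r h
    · subst h
      rw [List.length_set]
      exact hr _ (pv_getD_mem _ _ _ (by omega))
  · exact ⟨hl, hr⟩

theorem pvUpd_get {char : String} {cv : List (List String)} {H W : Nat} {sy sx : Int}
    {ty tx : Nat} (hs : pvShape cv H W) (hty : ty < H) (htx : tx < W) :
    pvGetCell (pvUpd char cv sy sx) ty tx =
      if sy = (ty : Int) ∧ sx = (tx : Int) then char else pvGetCell cv ty tx := by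
  obtain ⟨hl, hr⟩ := hs
  have hcvne : cv ≠ [] := by intro h; subst h; simp at hl; omega
  have hhead : (cv.headD []).length = W := hr _ (by cases cv with | nil => exact absurd rfl hcvne | cons a l => simp)
  have hrow : ∀ n, n < H → (cv.getD n []).length = W := fun n hn => hr _ (pv_getD_mem _ _ _ (by omega))
  unfold pvUpd pvGetCell
  by_cases hcase : sy = (ty : Int) ∧ sx = (tx : Int)
  · obtain ⟨h1, h2⟩ := hcase
    rw [if_pos (by refine ⟨by omega, by omega, by omega, ?_⟩; rw [hhead]; omega)]
    rw [if_pos ⟨h1, h2⟩]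
    have hsy : sy.toNat = ty := by omega
    have hsx : sx.toNat = tx := by omega
    rw [hsy, hsx, pv_getD_set_self _ _ _ _ (by omega), pv_getD_set_self _ _ _ _ (by rw [hrow ty hty]; omega)]
  · rw [if_neg hcase]
    split
    · rename_i hg
      by_cases hy : sy.toNat = ty
      · have hx : sx.toNat ≠ tx := by intro h; exact hcase ⟨by omega, by omega⟩
        rw [hy, pv_getD_set_self _ _ _ _ (by omega), pv_getD_set_ne _ _ _ _ _ hx]
      · rw [pv_getD_set_ne _ _ _ _ _ hy]
    · rfl

theorem pv_foldl_shape {α : Type} {H W : Nat} (f : List (List String) → α → List (List String))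
    (hf : ∀ cv a, pvShape cv H W → pvShape (f cv a) H W) :
    ∀ (l : List α) (cv : List (List String)), pvShape cv H W → pvShape (l.foldl f cv) H W := by
  intro l
  induction l with
  | nil => intro cv hs; exact hs
  | cons a t ih => intro cv hs; exact ih _ (hf cv a hs)

theorem pvLine_get {dx dy : Int} {char : String} {y : Int} {H W : Nat} {ty tx : Nat}
    (hty : ty < H) (htx : tx < W) :
    ∀ (line : List Char) (s : Int) (cv : List (List String)), pvShape cv H W →
    pvGetCell ((PySem.List.enumerate line s).foldl
        (fun c q => if q.2 ≠ ' ' then pvUpd char c (y + dy) (q.1 + dx) else c) cv) ty tx =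
      if (ty : Int) = y + dy ∧ 0 ≤ (tx : Int) - dx - s ∧ (tx : Int) - dx - s < line.length ∧
          line.getD ((tx : Int) - dx - s).toNat ' ' ≠ ' '
      then char else pvGetCell cv ty tx := by
  intro line
  induction line with
  | nil =>
    intro s cv hs
    rw [PySem.List.enumerate_nil, List.foldl_nil, if_neg]
    rintro ⟨_, h1, h2, _⟩
    simp at h2
    omega
  | cons c rest ih =>
    intro s cv hs
    rw [PySem.List.enumerate_cons, List.foldl_cons]
    have hs1 : pvShape (if (s, c).2 ≠ ' ' then pvUpd char cv (y + dy) ((s, c).1 + dx) else cv) H W := by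
      split
      · exact pvUpd_shape hs
      · exact hs
    rw [ih (s + 1) _ hs1]
    by_cases hc : c = ' '
    · simp only [hc, ne_eq, not_true_eq_false, if_false]
      by_cases hC' : (ty : Int) = y + dy ∧ 0 ≤ (tx : Int) - dx - (s + 1) ∧ (tx : Int) - dx - (s + 1) < rest.length ∧
          rest.getD ((tx : Int) - dx - (s + 1)).toNat ' ' ≠ ' '
      · rw [if_pos hC', if_pos]
        obtain ⟨e1, e2, e3, e4⟩ := hC'
        refine ⟨e1, by omega, by simp; omega, ?_⟩
        have hnx : ((tx : Int) - dx - s).toNat = ((tx : Int) - dx - (s + 1)).toNat + 1 := by omega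
        rw [hnx, List.getD_cons_succ]
        exact e4
      · rw [if_neg hC', if_neg]
        rintro ⟨e1, e2, e3, e4⟩
        by_cases hx0 : (tx : Int) - dx - s = 0
        · have hl0 : ((tx : Int) - dx - s).toNat = 0 := by omega
          rw [hl0, List.getD_cons_zero] at e4
          exact e4 rfl
        · apply hC'
          refine ⟨e1, by omega, by simp at e3; omega, ?_⟩
          have hnx : ((tx : Int) - dx - s).toNat = ((tx : Int) - dx - (s + 1)).toNat + 1 := by omega
          rw [hnx, List.getD_cons_succ] at e4
          exact e4
    · simp only [ne_eq, hc, not_false_eq_true, if_true]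
      rw [pvUpd_get hs hty htx]
      by_cases hC' : (ty : Int) = y + dy ∧ 0 ≤ (tx : Int) - dx - (s + 1) ∧ (tx : Int) - dx - (s + 1) < rest.length ∧
          rest.getD ((tx : Int) - dx - (s + 1)).toNat ' ' ≠ ' '
      · rw [if_pos hC', if_pos]
        obtain ⟨e1, e2, e3, e4⟩ := hC'
        refine ⟨e1, by omega, by simp; omega, ?_⟩
        have hnx : ((tx : Int) - dx - s).toNat = ((tx : Int) - dx - (s + 1)).toNat + 1 := by omega
        rw [hnx, List.getD_cons_succ]
        exact e4
      · rw [if_neg hC']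
        by_cases hD : y + dy = (ty : Int) ∧ s + dx = (tx : Int)
        · rw [if_pos hD, if_pos]
          refine ⟨hD.1.symm, by omega, by simp; omega, ?_⟩
          have hx0 : ((tx : Int) - dx - s).toNat = 0 := by omega
          rw [hx0, List.getD_cons_zero]
          exact hc
        · rw [if_neg hD, if_neg]
          rintro ⟨e1, e2, e3, e4⟩
          by_cases hx0 : (tx : Int) - dx - s = 0
          · exact hD ⟨e1.symm, by omega⟩
          · apply hC'
            refine ⟨e1, by omega, by simp at e3; omega, ?_⟩
            have hnx : ((tx : Int) - dx - s).toNat = ((tx : Int) - dx - (s + 1)).toNat + 1 := by omega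
            rw [hnx, List.getD_cons_succ] at e4
            exact e4

theorem pvLine_shape {dx dy : Int} {char : String} {y : Int} {H W : Nat}
    {cv : List (List String)} {line : List Char} (hs : pvShape cv H W) :
    pvShape (pvLine dx dy char y cv line) H W := by
  unfold pvLine
  apply pv_foldl_shape _ _ _ _ hs
  intro cv q hcv
  split
  · exact pvUpd_shape hcv
  · exact hcv

theorem pvOuter_get {dx dy : Int} {char : String} {H W : Nat} {ty tx : Nat}
    (hty : ty < H) (htx : tx < W) :
    ∀ (blk : List String) (s : Int) (cv : List (List String)), pvShape cv H W →
    pvGetCell ((PySem.List.enumerate blk s).foldl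
        (fun cv p => pvLine dx dy char p.1 cv p.2.toList) cv) ty tx =
      if 0 ≤ (ty : Int) - dy - s ∧ (ty : Int) - dy - s < blk.length ∧
          0 ≤ (tx : Int) - dx ∧
          (tx : Int) - dx < ((blk.getD ((ty : Int) - dy - s).toNat "").toList.length : Int) ∧
          (blk.getD ((ty : Int) - dy - s).toNat "").toList.getD ((tx : Int) - dx).toNat ' ' ≠ ' '
      then char else pvGetCell cv ty tx := by
  intro blk
  induction blk with
  | nil =>
    intro s cv hs
    rw [PySem.List.enumerate_nil, List.foldl_nil, if_neg]
    rintro ⟨h1, h2, _⟩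
    simp at h2
    omega
  | cons l rest ih =>
    intro s cv hs
    rw [PySem.List.enumerate_cons, List.foldl_cons]
    rw [ih (s + 1) _ (pvLine_shape hs)]
    have hline := pvLine_get (dx := dx) (dy := dy) (char := char) (y := s) hty htx l.toList 0 cv hs
    by_cases hC' : 0 ≤ (ty : Int) - dy - (s + 1) ∧ (ty : Int) - dy - (s + 1) < rest.length ∧
        0 ≤ (tx : Int) - dx ∧
        (tx : Int) - dx < ((rest.getD ((ty : Int) - dy - (s + 1)).toNat "").toList.length : Int) ∧
        (rest.getD ((ty : Int) - dy - (s + 1)).toNat "").toList.getD ((tx : Int) - dx).toNat ' ' ≠ ' '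
    · rw [if_pos hC', if_pos]
      obtain ⟨e1, e2, e3, e4, e5⟩ := hC'
      have hnx : ((ty : Int) - dy - s).toNat = ((ty : Int) - dy - (s + 1)).toNat + 1 := by omega
      refine ⟨by omega, by simp; omega, e3, ?_, ?_⟩ <;> rw [hnx, List.getD_cons_succ]
      · exact e4
      · exact e5
    · rw [if_neg hC']
      unfold pvLine
      rw [hline]
      by_cases hy0 : (ty : Int) - dy - s = 0
      · have hl0 : ((ty : Int) - dy - s).toNat = 0 := by omega
        by_cases hD : (ty : Int) = s + dy ∧ 0 ≤ (tx : Int) - dx - 0 ∧ (tx : Int) - dx - 0 < l.toList.length ∧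
            l.toList.getD ((tx : Int) - dx - 0).toNat ' ' ≠ ' '
        · rw [if_pos hD, if_pos]
          obtain ⟨e1, e2, e3, e4⟩ := hD
          rw [hl0, List.getD_cons_zero]
          exact ⟨by omega, by simp; omega, by omega, by omega, by
            have h0 : (tx : Int) - dx - 0 = (tx : Int) - dx := by ring
            rw [h0] at e4; exact e4⟩
        · rw [if_neg hD, if_neg]
          rintro ⟨e1, e2, e3, e4, e5⟩
          rw [hl0, List.getD_cons_zero] at e4 e5
          exact hD ⟨by omega, by omega, by omega, by
            have : (tx : Int) - dx - 0 = (tx : Int) - dx := by ring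
            rw [this]; exact e5⟩
      · rw [if_neg (by rintro ⟨e1, _⟩; omega), if_neg]
        rintro ⟨e1, e2, e3, e4, e5⟩
        have hnx : ((ty : Int) - dy - s).toNat = ((ty : Int) - dy - (s + 1)).toNat + 1 := by omega
        rw [hnx, List.getD_cons_succ] at e4 e5
        exact hC' ⟨by omega, by simp at e2; omega, e3, e4, e5⟩

theorem pv_getD_eq {α : Type} (l : List α) (n : Nat) (d : α) (h : n < l.length) :
    l.getD n d = l[n] := by
  rw [List.getD_eq_getElem?_getD, List.getElem?_eq_getElem h]
  rfl

theorem pv_main (block : List String) (dx dy : Int) (char : String) :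
    ((PySem.List.enumerate block 0).foldl
        (fun cv p => pvLine dx dy char p.1 cv p.2.toList)
        (List.replicate ((block.length : Int) + dy).toNat
          (List.replicate (((block.map (fun l => ((l.toList.length : Int)))).foldl max 0) + dx).toNat " "))).map String.join
    = (PySem.List.pyRange 0 ((block.length : Int) + dy) 1).map (fun sy =>
        String.join ((PySem.List.pyRange 0 (((block.map (fun l => ((l.toList.length : Int)))).foldl max 0) + dx) 1).map
          (fun sx => pvCell block dx dy char (block.length : Int) sy sx))) := by
  set w : Int := (block.map (fun l => ((l.toList.length : Int)))).foldl max 0 with hw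
  set H0 : Nat := ((block.length : Int) + dy).toNat with hH0
  set W0 : Nat := (w + dx).toNat with hW0
  have hcanvas : pvShape (List.replicate H0 (List.replicate W0 " ")) H0 W0 := by
    constructor
    · simp
    · intro r hr
      rw [List.eq_of_mem_replicate hr]
      simp
  set final := (PySem.List.enumerate block 0).foldl
      (fun cv p => pvLine dx dy char p.1 cv p.2.toList)
      (List.replicate H0 (List.replicate W0 " ")) with hfinal
  have hshape : pvShape final H0 W0 := by
    apply pv_foldl_shape _ _ _ _ hcanvas
    intro cv p hcv
    exact pvLine_shape hcv
  have key : final = (PySem.List.pyRange 0 ((block.length : Int) + dy) 1).map (fun sy =>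
      (PySem.List.pyRange 0 (w + dx) 1).map (fun sx => pvCell block dx dy char (block.length : Int) sy sx)) := by
    apply List.ext_getElem
    · rw [List.length_map, PySem.List.length_pyRange_one, hshape.1]
      omega
    · intro i h1 h2
      rw [List.getElem_map, PySem.List.getElem_pyRange_one]
      have hiH : i < H0 := by rw [← hshape.1]; exact h1
      apply List.ext_getElem
      · rw [List.length_map, PySem.List.length_pyRange_one]
        rw [hshape.2 _ (List.getElem_mem h1)]
        omega
      · intro j hj1 hj2
        rw [List.getElem_map, PySem.List.getElem_pyRange_one]
        have hjW : j < W0 := by rw [← hshape.2 _ (List.getElem_mem h1)]; exact hj1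
        have hget : pvGetCell final i j = final[i][j] := by
          unfold pvGetCell
          rw [pv_getD_eq final i [] h1, pv_getD_eq _ j " " hj1]
        rw [← hget, hfinal]
        rw [pvOuter_get hiH hjW block 0 _ hcanvas]
        have hinit : pvGetCell (List.replicate H0 (List.replicate W0 " ")) i j = " " := by
          unfold pvGetCell
          rw [pv_getD_eq _ i [] (by simpa using hiH), List.getElem_replicate]
          rw [pv_getD_eq _ j " " (by simpa using hjW), List.getElem_replicate]
        rw [hinit]
        -- now compare with pvCell
        unfold pvCell
        simp only [zero_add, sub_zero]
        by_cases hy : 0 ≤ (i : Int) - dy ∧ (i : Int) - dy < (block.length : Int)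
        · rw [if_pos hy]
          rw [PySem.List.pyGetD_of_nonneg _ _ hy.1]
          by_cases hx : 0 ≤ (j : Int) - dx ∧ (j : Int) - dx < ((block.getD ((i:Int) - dy).toNat "").toList.length : Int) ∧
              (block.getD ((i:Int) - dy).toNat "").toList.getD ((j:Int) - dx).toNat ' ' ≠ ' '
          · rw [if_pos hx, if_pos ⟨hy.1, hy.2, hx⟩]
          · rw [if_neg hx, if_neg]
            rintro ⟨e1, e2, e3, e4, e5⟩
            exact hx ⟨e3, e4, e5⟩
        · rw [if_neg hy, if_neg]
          rintro ⟨e1, e2, _⟩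
          exact hy ⟨e1, e2⟩
  rw [key, List.map_map]
  rfl

-- ===== VERDICT (by name: the statement is the Claim_ definition above) =====
theorem shadow_block_spec : Claim_equal_shadow_block := by
  intro block dx dy char _
  unfold Spec_shadow_block shadow_block shadow_block_alt
  exact pv_main block dx dy char
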